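-- pv_equiv track=rewrite | github.com/jchy20/how-much-backtrack | reasoning-gym/reasoning_gym/arc/arc_1d_tasks.py | transform_duplicate_block_from_seeds
-- ===== SOURCE A (Python) =====
-- def transform_duplicate_block_from_seeds(input_grid: list[int]) -> list[int]:
--     size = len(input_grid)
--
--     # 1. Locate the main block: the first run of 1's of length ≥ 2
--     block_start = None
--     B = 0
--     i = 0
--     while i < size:
--         if input_grid[i] == 1:
--             # count contiguous 1's
--             j = i
--             while j < size and input_grid[j] == 1:
--                 j += 1
--             run_len = j - i
--             if run_len >= 2:
--                 block_start, B = i, run_len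
--                 break
--             else:
--                 i = j
--         else:
--             i += 1
--
--     # no valid block found
--     if block_start is None:
--         return input_grid.copy()
--
--     block_end = block_start + B - 1
--
--     # 2. Check for seeds at exactly two positions
--     seeds = []
--     left_pos = block_start - 2
--     if 0 <= left_pos < size and input_grid[left_pos] != 0:
--         seeds.append(("left", left_pos, input_grid[left_pos]))
--     right_pos = block_end + 2
--     if 0 <= right_pos < size and input_grid[right_pos] != 0:
--         seeds.append(("right", right_pos, input_grid[right_pos]))
--
--     # 3. Start from the original grid and apply duplications
--     output = input_grid.copy()
--
--     for side, seed_pos, color in seeds: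
--         if side == "left":
--             end_pos = seed_pos
--             while end_pos >= 0:
--                 start_pos = end_pos - B + 1
--                 # paint from max(0,start_pos) to end_pos
--                 for p in range(max(0, start_pos), end_pos + 1):
--                     output[p] = color
--                 if start_pos < 1:
--                     break
--                 # move to next block location (gap of 1)
--                 end_pos = start_pos - 2
--
--         else:  # "right"
--             start_pos = seed_pos
--             while start_pos < size:
--                 # paint B cells from start_pos
--                 for offset in range(min(B, size - start_pos)):
--                     output[start_pos + offset] = color
--                 if start_pos + B + 1 >= size:
--                     break
--                 # move to next block location (gap of 1)
--                 start_pos += B + 1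
--
--     return output
-- ===== SOURCE B (Python) =====
-- def transform_duplicate_block_from_seeds(input_grid: list[int]) -> list[int]:
--     g = input_grid
--     n = len(g)
--
--     # locate the first run of 1's of length >= 2 (same linear scan as the original)
--     found = _find_block(g)
--     if found is None:
--         return g.copy()
--     bs, B = found
--
--     lp = bs - 2
--     rp = bs + B + 1
--     left = g[lp] if 0 <= lp and g[lp] != 0 else None
--     right = g[rp] if rp < n and g[rp] != 0 else None
--
--     # single pass: each cell's color follows from a modular predicate
--     return [_cell(g, x, lp, rp, B, left, right) for x in range(n)]
--
--
-- def _find_block(g):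
--     n = len(g)
--     i = 0
--     while i < n:
--         if g[i] != 1:
--             i += 1
--             continue
--         j = i
--         while j < n and g[j] == 1:
--             j += 1
--         if j - i >= 2:
--             return i, j - i
--         i = j
--     return None
--
--
-- def _cell(g, x, lp, rp, B, left, right):
--     c = g[x]
--     if left is not None and x <= lp and (lp - x) % (B + 1) < B:
--         c = left
--     if right is not None and x >= rp and (x - rp) % (B + 1) < B:
--         c = right
--     return c
-- ===== Notes on version B (the rewrite author's own statement) =====
-- stated objective: alternative
-- what changed: The two iterative block-stamping while-loops (repeatedly painting B-cell blocks with gap 1 outward from each seed) are replaced by a single pass over all indices that colours each cell directly from a modular predicate ((lp-x) % (B+1) < B on the left side, (x-rp) % (B+1) < B on the right).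
import Mathlib
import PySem

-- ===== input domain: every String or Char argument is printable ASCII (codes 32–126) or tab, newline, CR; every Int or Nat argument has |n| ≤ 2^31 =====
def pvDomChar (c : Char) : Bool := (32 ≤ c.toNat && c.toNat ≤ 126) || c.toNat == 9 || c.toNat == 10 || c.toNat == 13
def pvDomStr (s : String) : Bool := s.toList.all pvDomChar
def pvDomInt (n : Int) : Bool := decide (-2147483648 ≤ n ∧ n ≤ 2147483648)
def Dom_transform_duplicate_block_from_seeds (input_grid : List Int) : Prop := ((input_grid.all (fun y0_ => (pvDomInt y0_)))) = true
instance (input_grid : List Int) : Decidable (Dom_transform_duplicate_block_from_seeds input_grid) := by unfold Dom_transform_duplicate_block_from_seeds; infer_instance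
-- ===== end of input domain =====

-- B replaces A's iterative block-stamping loops by one pass that colours each cell from a
-- modular predicate (objective: alternative decomposition, same asymptotic cost).

-- ===== PORT A =====

-- inner `while j < size and input_grid[j] == 1: j += 1` (index always in range, so getD is exact)
def pvRunEndA (g : List Int) (j : Nat) : Nat :=
  if j < g.length ∧ g.getD j 0 = 1 then pvRunEndA g (j + 1) else j
termination_by g.length - j
decreasing_by omega

-- cited by pvFindBlockA's decreasing_by
theorem pvRunEndA_le (g : List Int) : ∀ n j, g.length - j = n → j ≤ pvRunEndA g j := by
  intro n
  induction n using Nat.strong_induction_on with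
  | _ n ih =>
    intro j hm
    by_cases h : j < g.length ∧ g.getD j 0 = 1
    · rw [pvRunEndA, if_pos h]
      have := ih (g.length - (j + 1)) (by omega) (j + 1) rfl
      omega
    · rw [pvRunEndA, if_neg h]

-- cited by pvFindBlockA's decreasing_by
theorem pvRunEndA_gt (g : List Int) (i : Nat) (h1 : i < g.length) (h2 : g.getD i 0 = 1) :
    i < pvRunEndA g i := by
  rw [pvRunEndA, if_pos ⟨h1, h2⟩]
  have := pvRunEndA_le g (g.length - (i + 1)) (i + 1) rfl
  omega

-- step 1 of A: the outer scan for the first run of 1's of length ≥ 2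
def pvFindBlockA (g : List Int) (i : Nat) : Option (Nat × Nat) :=
  if h : i < g.length then
    if hg : g.getD i 0 = 1 then
      if 2 ≤ pvRunEndA g i - i then some (i, pvRunEndA g i - i) else pvFindBlockA g (pvRunEndA g i)
    else pvFindBlockA g (i + 1)
  else none
termination_by g.length - i
decreasing_by
  · have := pvRunEndA_gt g i h hg; omega
  · omega

-- `for p in range(max(0,start_pos), end_pos+1): output[p] = color` (p is always a valid index)
def pvPaintSegL (out : List Int) (color : Int) (a b : Int) : List Int :=
  (PySem.List.pyRange a b 1).foldl (fun o p => o.set p.toNat color) out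

-- the "left" seed while-loop of A
def pvPaintLeft (out : List Int) (color : Int) (B : Nat) (endPos : Int) : List Int :=
  if h0 : 0 ≤ endPos then
    if h1 : endPos - B + 1 < 1 then pvPaintSegL out color (max 0 (endPos - B + 1)) (endPos + 1)
    else pvPaintLeft (pvPaintSegL out color (max 0 (endPos - B + 1)) (endPos + 1)) color B
      (endPos - B + 1 - 2)
  else out
termination_by (endPos + 1).toNat
decreasing_by omega

-- `for offset in range(min(B, size - start_pos)): output[start_pos+offset] = color`
def pvPaintSegR (out : List Int) (color : Int) (s m : Int) : List Int :=
  (PySem.List.pyRange 0 m 1).foldl (fun o p => o.set (s + p).toNat color) out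

-- the "right" seed while-loop of A
def pvPaintRight (out : List Int) (color : Int) (B : Nat) (size : Int) (startPos : Int) : List Int :=
  if h0 : startPos < size then
    if h1 : size ≤ startPos + B + 1 then pvPaintSegR out color startPos (min (B : Int) (size - startPos))
    else pvPaintRight (pvPaintSegR out color startPos (min (B : Int) (size - startPos))) color B
      size (startPos + B + 1)
  else out
termination_by (size - startPos).toNat
decreasing_by omega

def transform_duplicate_block_from_seeds (input_grid : List Int) : List Int :=
  let size := input_grid.length
  match pvFindBlockA input_grid 0 with
  | none => input_grid
  | some (block_start, B) =>
    let block_end : Int := (block_start : Int) + B - 1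
    let left_pos : Int := (block_start : Int) - 2
    let right_pos : Int := block_end + 2
    let seeds : List (String × Int × Int) :=
      (if 0 ≤ left_pos ∧ left_pos < (size : Int) ∧ input_grid.getD left_pos.toNat 0 ≠ 0 then
        [("left", left_pos, input_grid.getD left_pos.toNat 0)] else []) ++
      (if 0 ≤ right_pos ∧ right_pos < (size : Int) ∧ input_grid.getD right_pos.toNat 0 ≠ 0 then
        [("right", right_pos, input_grid.getD right_pos.toNat 0)] else [])
    seeds.foldl (fun output s =>
      if s.1 = "left" then pvPaintLeft output s.2.2 B s.2.1
      else pvPaintRight output s.2.2 B (size : Int) s.2.1) input_grid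

-- ===== PORT B =====

-- _find_block of Source B (same linear scan, written with `continue`)
def pvRunEndB (g : List Int) (j : Nat) : Nat :=
  if j < g.length ∧ g.getD j 0 = 1 then pvRunEndB g (j + 1) else j
termination_by g.length - j
decreasing_by omega

-- cited by pvFindBlockB's decreasing_by
theorem pvRunEndB_le (g : List Int) : ∀ n j, g.length - j = n → j ≤ pvRunEndB g j := by
  intro n
  induction n using Nat.strong_induction_on with
  | _ n ih =>
    intro j hm
    by_cases h : j < g.length ∧ g.getD j 0 = 1
    · rw [pvRunEndB, if_pos h]
      have := ih (g.length - (j + 1)) (by omega) (j + 1) rfl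
      omega
    · rw [pvRunEndB, if_neg h]

-- cited by pvFindBlockB's decreasing_by
theorem pvRunEndB_gt (g : List Int) (i : Nat) (h1 : i < g.length) (h2 : g.getD i 0 = 1) :
    i < pvRunEndB g i := by
  rw [pvRunEndB, if_pos ⟨h1, h2⟩]
  have := pvRunEndB_le g (g.length - (i + 1)) (i + 1) rfl
  omega

def pvFindBlockB (g : List Int) (i : Nat) : Option (Nat × Nat) :=
  if h : i < g.length then
    if hg : g.getD i 0 = 1 then
      if 2 ≤ pvRunEndB g i - i then some (i, pvRunEndB g i - i) else pvFindBlockB g (pvRunEndB g i)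
    else pvFindBlockB g (i + 1)
  else none
termination_by g.length - i
decreasing_by
  · have := pvRunEndB_gt g i h hg; omega
  · omega

-- _cell of Source B
def pvCellB (g : List Int) (lp rp : Int) (B : Nat) (left right : Option Int) (x : Nat) : Int :=
  let c0 := g.getD x 0
  let c1 := match left with
    | some cl => if (x : Int) ≤ lp ∧ (lp - x) % ((B : Int) + 1) < (B : Int) then cl else c0
    | none => c0
  match right with
  | some cr => if rp ≤ (x : Int) ∧ ((x : Int) - rp) % ((B : Int) + 1) < (B : Int) then cr else c1
  | none => c1

def transform_duplicate_block_from_seeds_alt (input_grid : List Int) : List Int :=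
  let n := input_grid.length
  match pvFindBlockB input_grid 0 with
  | none => input_grid
  | some (bs, B) =>
    let lp : Int := (bs : Int) - 2
    let rp : Int := (bs : Int) + B + 1
    let left : Option Int :=
      if 0 ≤ lp ∧ input_grid.getD lp.toNat 0 ≠ 0 then some (input_grid.getD lp.toNat 0) else none
    let right : Option Int :=
      if rp < (n : Int) ∧ input_grid.getD rp.toNat 0 ≠ 0 then some (input_grid.getD rp.toNat 0) else none
    (List.range n).map (pvCellB input_grid lp rp B left right)

-- ===== PRECONDITION & SPEC =====
def Spec_transform_duplicate_block_from_seeds (input_grid : List Int) (out : List Int) : Prop := out = transform_duplicate_block_from_seeds_alt input_grid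
instance (input_grid : List Int) (out : List Int) : Decidable (Spec_transform_duplicate_block_from_seeds input_grid out) := by unfold Spec_transform_duplicate_block_from_seeds; infer_instance

-- ===== CLAIM (what is proved, stated in full; the proofs are below) =====
def Claim_equal_transform_duplicate_block_from_seeds : Prop := ∀ (input_grid : List Int), Dom_transform_duplicate_block_from_seeds input_grid → Spec_transform_duplicate_block_from_seeds input_grid (transform_duplicate_block_from_seeds input_grid)

-- ===== LEMMAS AND PROOFS =====

theorem pvRunEndB_eq (g : List Int) : ∀ n j, g.length - j = n → pvRunEndB g j = pvRunEndA g j := by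
  intro n
  induction n using Nat.strong_induction_on with
  | _ n ih =>
    intro j hm
    by_cases h : j < g.length ∧ g.getD j 0 = 1
    · rw [pvRunEndB, pvRunEndA, if_pos h, if_pos h]
      exact ih (g.length - (j + 1)) (by omega) (j + 1) rfl
    · rw [pvRunEndB, pvRunEndA, if_neg h, if_neg h]

theorem pvFindBlockB_eq (g : List Int) : ∀ n i, g.length - i = n → pvFindBlockB g i = pvFindBlockA g i := by
  intro n
  induction n using Nat.strong_induction_on with
  | _ n ih =>
    intro i hm
    by_cases h : i < g.length
    · by_cases hg : g.getD i 0 = 1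
      · rw [pvFindBlockB, pvFindBlockA, dif_pos h, dif_pos h, dif_pos hg, dif_pos hg,
          pvRunEndB_eq g (g.length - i) i rfl]
        by_cases hstop : 2 ≤ pvRunEndA g i - i
        · rw [if_pos hstop, if_pos hstop]
        · rw [if_neg hstop, if_neg hstop]
          exact ih (g.length - pvRunEndA g i) (by have := pvRunEndA_gt g i h hg; omega) _ rfl
      · rw [pvFindBlockB, pvFindBlockA, dif_pos h, dif_pos h, dif_neg hg, dif_neg hg]
        exact ih (g.length - (i + 1)) (by omega) _ rfl
    · rw [pvFindBlockB, pvFindBlockA, dif_neg h, dif_neg h]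

theorem pvFindBlockA_lt (g : List Int) : ∀ n i bs B, g.length - i = n →
    pvFindBlockA g i = some (bs, B) → bs < g.length ∧ 2 ≤ B := by
  intro n
  induction n using Nat.strong_induction_on with
  | _ n ih =>
    intro i bs B hm h
    rw [pvFindBlockA] at h
    by_cases hi : i < g.length
    · rw [dif_pos hi] at h
      by_cases hg : g.getD i 0 = 1
      · rw [dif_pos hg] at h
        by_cases hstop : 2 ≤ pvRunEndA g i - i
        · rw [if_pos hstop] at h
          simp only [Option.some.injEq, Prod.mk.injEq] at h
          omega
        · rw [if_neg hstop] at h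
          exact ih (g.length - pvRunEndA g i) (by have := pvRunEndA_gt g i hi hg; omega) _ _ _ rfl h
      · rw [dif_neg hg] at h
        exact ih (g.length - (i + 1)) (by omega) _ _ _ rfl h
    · rw [dif_neg hi] at h
      simp at h

theorem pvPaintSegL_length (out : List Int) (c a b : Int) :
    (pvPaintSegL out c a b).length = out.length := by
  unfold pvPaintSegL
  generalize PySem.List.pyRange a b 1 = l
  induction l generalizing out with
  | nil => rfl
  | cons p l ih => simp only [List.foldl_cons, ih, List.length_set]

theorem pvPaintSegR_length (out : List Int) (c s m : Int) :
    (pvPaintSegR out c s m).length = out.length := by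
  unfold pvPaintSegR
  generalize PySem.List.pyRange 0 m 1 = l
  induction l generalizing out with
  | nil => rfl
  | cons p l ih => simp only [List.foldl_cons, ih, List.length_set]

theorem pvPaintSegL_get? (c : Int) (b : Int) : ∀ (n : Nat) (a : Int), (b - a).toNat = n → 0 ≤ a →
    ∀ (out : List Int) (x : Nat),
    (pvPaintSegL out c a b)[x]? =
      if a ≤ (x : Int) ∧ (x : Int) < b then out[x]?.map (fun _ => c) else out[x]? := by
  intro n
  induction n with
  | zero =>
    intro a hn ha out x
    unfold pvPaintSegL
    rw [PySem.List.pyRange_one_eq_nil (by omega), List.foldl_nil, if_neg (by omega)]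
  | succ n ih =>
    intro a hn ha out x
    unfold pvPaintSegL
    rw [PySem.List.pyRange_one_cons (by omega), List.foldl_cons]
    have ihh := ih (a + 1) (by omega) (by omega) (out.set a.toNat c) x
    unfold pvPaintSegL at ihh
    rw [ihh]
    by_cases hxa : (x : Int) = a
    · rw [if_neg (by omega), if_pos (show a ≤ (x : Int) ∧ (x : Int) < b by omega)]
      have hx : x = a.toNat := by omega
      subst hx
      by_cases hlen : a.toNat < out.length
      · rw [List.getElem?_set_eq_of_lt c hlen, List.getElem?_eq_getElem hlen]
        rfl
      · have hnone1 : out[a.toNat]? = none := List.getElem?_eq_none (by omega)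
        have hnone2 : (out.set a.toNat c)[a.toNat]? = none :=
          List.getElem?_eq_none (by rw [List.length_set]; omega)
        rw [hnone1, hnone2]
        rfl
    · rw [List.getElem?_set_ne (by omega)]
      by_cases h1 : a + 1 ≤ (x : Int) ∧ (x : Int) < b
      · rw [if_pos h1, if_pos (by omega)]
      · rw [if_neg h1, if_neg (by omega)]

theorem pvPaintSegR_get? (c : Int) (s : Int) (hs : 0 ≤ s) (m : Int) (out : List Int) (x : Nat) :
    (pvPaintSegR out c s m)[x]? =
      if s ≤ (x : Int) ∧ (x : Int) < s + m then out[x]?.map (fun _ => c) else out[x]? := by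
  -- reduce the offset-based fold to the absolute-index fold of pvPaintSegL
  have key : ∀ (n : Nat) (a : Int), (m - a).toNat = n → 0 ≤ a → ∀ out : List Int,
      (PySem.List.pyRange a m 1).foldl (fun o p => o.set (s + p).toNat c) out =
      pvPaintSegL out c (s + a) (s + m) := by
    intro n
    induction n with
    | zero =>
      intro a hn ha out
      rw [PySem.List.pyRange_one_eq_nil (by omega)]
      unfold pvPaintSegL
      rw [PySem.List.pyRange_one_eq_nil (by omega), List.foldl_nil, List.foldl_nil]
    | succ n ih =>
      intro a hn ha out
      rw [PySem.List.pyRange_one_cons (by omega), List.foldl_cons,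
        ih (a + 1) (by omega) (by omega)]
      unfold pvPaintSegL
      rw [PySem.List.pyRange_one_cons (show s + a < s + m by omega), List.foldl_cons,
        show s + (a + 1) = s + a + 1 from by ring]
  unfold pvPaintSegR
  rw [key (m - 0).toNat 0 rfl le_rfl out, show s + (0 : Int) = s from add_zero s,
    pvPaintSegL_get? c (s + m) ((s + m - s).toNat) s rfl hs out x]

theorem pvPaintLeft_length (c : Int) (B : Nat) : ∀ (n : Nat) (e : Int), (e + 1).toNat = n →
    ∀ out : List Int, (pvPaintLeft out c B e).length = out.length := by
  intro n
  induction n using Nat.strong_induction_on with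
  | _ n ih =>
    intro e hn out
    by_cases h0 : 0 ≤ e
    · by_cases h1 : e - B + 1 < 1
      · rw [pvPaintLeft, dif_pos h0, dif_pos h1, pvPaintSegL_length]
      · rw [pvPaintLeft, dif_pos h0, dif_neg h1,
          ih ((e - B + 1 - 2) + 1).toNat (by omega) _ rfl, pvPaintSegL_length]
    · rw [pvPaintLeft, dif_neg h0]

theorem pvPaintLeft_get? (c : Int) (B : Nat) : ∀ (n : Nat) (e : Int), (e + 1).toNat = n →
    ∀ (out : List Int) (x : Nat),
    (pvPaintLeft out c B e)[x]? =
      if (x : Int) ≤ e ∧ (e - x) % ((B : Int) + 1) < (B : Int) then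
        out[x]?.map (fun _ => c) else out[x]? := by
  intro n
  induction n using Nat.strong_induction_on with
  | _ n ih =>
    intro e hn out x
    by_cases h0 : 0 ≤ e
    · by_cases h1 : e - B + 1 < 1
      · -- final (possibly clipped) block: e < B, paints 0..e
        rw [pvPaintLeft, dif_pos h0, dif_pos h1,
          pvPaintSegL_get? c (e + 1) ((e + 1 - max 0 (e - B + 1)).toNat) _ rfl (by omega) out x]
        by_cases hx : (x : Int) ≤ e
        · have hmod : (e - (x : Int)) % ((B : Int) + 1) = e - x :=
            Int.emod_eq_of_lt (by omega) (by omega)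
          have hS : max 0 (e - (B : Int) + 1) ≤ (x : Int) ∧ (x : Int) < e + 1 := by omega
          have hT : (x : Int) ≤ e ∧ (e - (x : Int)) % ((B : Int) + 1) < (B : Int) :=
            ⟨hx, by rw [hmod]; omega⟩
          rw [if_pos hS, if_pos hT]
        · have hS : ¬(max 0 (e - (B : Int) + 1) ≤ (x : Int) ∧ (x : Int) < e + 1) := by omega
          have hT : ¬((x : Int) ≤ e ∧ (e - (x : Int)) % ((B : Int) + 1) < (B : Int)) := by
            intro hc; omega
          rw [if_neg hS, if_neg hT]
      · -- paints e-B+1..e, then recurses at e-B-1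
        rw [pvPaintLeft, dif_pos h0, dif_neg h1,
          ih ((e - B + 1 - 2) + 1).toNat (by omega) _ rfl _ x,
          pvPaintSegL_get? c (e + 1) ((e + 1 - max 0 (e - B + 1)).toNat) _ rfl (by omega) out x]
        have hshift : (e - (x : Int)) % ((B : Int) + 1) =
            (e - B + 1 - 2 - (x : Int)) % ((B : Int) + 1) := by
          rw [show e - (x : Int) = (e - B + 1 - 2 - (x : Int)) + ((B : Int) + 1) * 1 from by ring,
            Int.add_mul_emod_self_left]
        by_cases hx1 : (x : Int) ≤ e - B + 1 - 2
        · -- below the painted block: the modular pattern just shifts by B+1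
          have hS : ¬(max 0 (e - (B : Int) + 1) ≤ (x : Int) ∧ (x : Int) < e + 1) := by omega
          rw [if_neg hS]
          by_cases hP2 : (e - (B : Int) + 1 - 2 - (x : Int)) % ((B : Int) + 1) < (B : Int)
          · have hP : (x : Int) ≤ e - (B : Int) + 1 - 2 ∧
                (e - (B : Int) + 1 - 2 - (x : Int)) % ((B : Int) + 1) < (B : Int) := ⟨hx1, hP2⟩
            have hT : (x : Int) ≤ e ∧ (e - (x : Int)) % ((B : Int) + 1) < (B : Int) :=
              ⟨by omega, by rw [hshift]; exact hP2⟩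
            rw [if_pos hP, if_pos hT]
          · have hP : ¬((x : Int) ≤ e - (B : Int) + 1 - 2 ∧
                (e - (B : Int) + 1 - 2 - (x : Int)) % ((B : Int) + 1) < (B : Int)) :=
              fun hc => hP2 hc.2
            have hT : ¬((x : Int) ≤ e ∧ (e - (x : Int)) % ((B : Int) + 1) < (B : Int)) :=
              fun hc => hP2 (by rw [← hshift]; exact hc.2)
            rw [if_neg hP, if_neg hT]
        · have hP : ¬((x : Int) ≤ e - (B : Int) + 1 - 2 ∧
              (e - (B : Int) + 1 - 2 - (x : Int)) % ((B : Int) + 1) < (B : Int)) :=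
            fun hc => hx1 hc.1
          rw [if_neg hP]
          by_cases hx2 : (x : Int) ≤ e
          · by_cases hx3 : e - (B : Int) + 1 ≤ (x : Int)
            · -- inside the painted block
              have hmod : (e - (x : Int)) % ((B : Int) + 1) = e - x :=
                Int.emod_eq_of_lt (by omega) (by omega)
              have hS : max 0 (e - (B : Int) + 1) ≤ (x : Int) ∧ (x : Int) < e + 1 := by omega
              have hT : (x : Int) ≤ e ∧ (e - (x : Int)) % ((B : Int) + 1) < (B : Int) :=
                ⟨hx2, by rw [hmod]; omega⟩
              rw [if_pos hS, if_pos hT]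
            · -- the single gap cell x = e - B
              have hmod : (e - (x : Int)) % ((B : Int) + 1) = (B : Int) := by
                rw [show e - (x : Int) = (B : Int) from by omega]
                exact Int.emod_eq_of_lt (by omega) (by omega)
              have hS : ¬(max 0 (e - (B : Int) + 1) ≤ (x : Int) ∧ (x : Int) < e + 1) := by omega
              have hT : ¬((x : Int) ≤ e ∧ (e - (x : Int)) % ((B : Int) + 1) < (B : Int)) := by
                intro hc; rw [hmod] at hc; omega
              rw [if_neg hS, if_neg hT]
          · have hS : ¬(max 0 (e - (B : Int) + 1) ≤ (x : Int) ∧ (x : Int) < e + 1) := by omega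
            have hT : ¬((x : Int) ≤ e ∧ (e - (x : Int)) % ((B : Int) + 1) < (B : Int)) := by
              intro hc; omega
            rw [if_neg hS, if_neg hT]
    · rw [pvPaintLeft, dif_neg h0,
        if_neg (show ¬((x : Int) ≤ e ∧ (e - (x : Int)) % ((B : Int) + 1) < (B : Int)) by
          intro hc; omega)]

theorem pvPaintRight_get? (c : Int) (B : Nat) (size : Int) : ∀ (n : Nat) (s : Int),
    (size - s).toNat = n → 0 ≤ s → ∀ out : List Int, size = (out.length : Int) → ∀ x : Nat,
    (pvPaintRight out c B size s)[x]? =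
      if s ≤ (x : Int) ∧ ((x : Int) - s) % ((B : Int) + 1) < (B : Int) then
        out[x]?.map (fun _ => c) else out[x]? := by
  intro n
  induction n using Nat.strong_induction_on with
  | _ n ih =>
    intro s hn hs out hsize x
    by_cases h0 : s < size
    · by_cases h1 : size ≤ s + B + 1
      · -- last (possibly clipped) block, then the loop stops
        rw [pvPaintRight, dif_pos h0, dif_pos h1, pvPaintSegR_get? c s hs _ out x]
        by_cases hxl : (x : Int) < size
        · by_cases hx : s ≤ (x : Int) ∧ (x : Int) < s + min ((B : Int)) (size - s)
          · have hmod : ((x : Int) - s) % ((B : Int) + 1) = (x : Int) - s :=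
              Int.emod_eq_of_lt (by omega) (by omega)
            have hT : s ≤ (x : Int) ∧ ((x : Int) - s) % ((B : Int) + 1) < (B : Int) :=
              ⟨hx.1, by rw [hmod]; omega⟩
            rw [if_pos hx, if_pos hT]
          · rw [if_neg hx]
            by_cases hx1 : s ≤ (x : Int)
            · -- the only unpainted cell with s ≤ x < size is x = s + B
              have hmod : ((x : Int) - s) % ((B : Int) + 1) = (B : Int) := by
                rw [show (x : Int) - s = (B : Int) from by omega]
                exact Int.emod_eq_of_lt (by omega) (by omega)
              have hT : ¬(s ≤ (x : Int) ∧ ((x : Int) - s) % ((B : Int) + 1) < (B : Int)) := by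
                intro hc; rw [hmod] at hc; omega
              rw [if_neg hT]
            · have hT : ¬(s ≤ (x : Int) ∧ ((x : Int) - s) % ((B : Int) + 1) < (B : Int)) := by
                intro hc; omega
              rw [if_neg hT]
        · have ho : out[x]? = none := List.getElem?_eq_none (by omega)
          rw [ho]
          split <;> split <;> rfl
      · -- full block painted, then recurse at s + B + 1
        rw [pvPaintRight, dif_pos h0, dif_neg h1,
          ih (size - (s + B + 1)).toNat (by omega) _ rfl (by omega) _
            (by rw [pvPaintSegR_length]; exact hsize) x,
          pvPaintSegR_get? c s hs _ out x,
          show min ((B : Int)) (size - s) = (B : Int) from by omega]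
        have hshift : ((x : Int) - s) % ((B : Int) + 1) =
            ((x : Int) - (s + B + 1)) % ((B : Int) + 1) := by
          rw [show (x : Int) - s = ((x : Int) - (s + B + 1)) + ((B : Int) + 1) * 1 from by ring,
            Int.add_mul_emod_self_left]
        by_cases hx1 : s + (B : Int) + 1 ≤ (x : Int)
        · have hS : ¬(s ≤ (x : Int) ∧ (x : Int) < s + (B : Int)) := by intro hc; omega
          rw [if_neg hS]
          by_cases hP2 : ((x : Int) - (s + (B : Int) + 1)) % ((B : Int) + 1) < (B : Int)
          · have hP : s + (B : Int) + 1 ≤ (x : Int) ∧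
                ((x : Int) - (s + (B : Int) + 1)) % ((B : Int) + 1) < (B : Int) := ⟨hx1, hP2⟩
            have hT : s ≤ (x : Int) ∧ ((x : Int) - s) % ((B : Int) + 1) < (B : Int) :=
              ⟨by omega, by rw [hshift]; exact hP2⟩
            rw [if_pos hP, if_pos hT]
          · have hP : ¬(s + (B : Int) + 1 ≤ (x : Int) ∧
                ((x : Int) - (s + (B : Int) + 1)) % ((B : Int) + 1) < (B : Int)) :=
              fun hc => hP2 hc.2
            have hT : ¬(s ≤ (x : Int) ∧ ((x : Int) - s) % ((B : Int) + 1) < (B : Int)) :=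
              fun hc => hP2 (by rw [← hshift]; exact hc.2)
            rw [if_neg hP, if_neg hT]
        · have hP : ¬(s + (B : Int) + 1 ≤ (x : Int) ∧
              ((x : Int) - (s + (B : Int) + 1)) % ((B : Int) + 1) < (B : Int)) :=
            fun hc => hx1 hc.1
          rw [if_neg hP]
          by_cases hx2 : s ≤ (x : Int) ∧ (x : Int) < s + (B : Int)
          · have hmod : ((x : Int) - s) % ((B : Int) + 1) = (x : Int) - s :=
              Int.emod_eq_of_lt (by omega) (by omega)
            have hT : s ≤ (x : Int) ∧ ((x : Int) - s) % ((B : Int) + 1) < (B : Int) :=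
              ⟨hx2.1, by rw [hmod]; omega⟩
            rw [if_pos hx2, if_pos hT]
          · rw [if_neg hx2]
            by_cases hx3 : s ≤ (x : Int)
            · -- the gap cell x = s + B
              have hmod : ((x : Int) - s) % ((B : Int) + 1) = (B : Int) := by
                rw [show (x : Int) - s = (B : Int) from by omega]
                exact Int.emod_eq_of_lt (by omega) (by omega)
              have hT : ¬(s ≤ (x : Int) ∧ ((x : Int) - s) % ((B : Int) + 1) < (B : Int)) := by
                intro hc; rw [hmod] at hc; omega
              rw [if_neg hT]
            · have hT : ¬(s ≤ (x : Int) ∧ ((x : Int) - s) % ((B : Int) + 1) < (B : Int)) := by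
                intro hc; omega
              rw [if_neg hT]
    · rw [pvPaintRight, dif_neg h0]
      by_cases hc : s ≤ (x : Int) ∧ ((x : Int) - s) % ((B : Int) + 1) < (B : Int)
      · rw [if_pos hc, List.getElem?_eq_none (show out.length ≤ x by omega)]
        rfl
      · rw [if_neg hc]

-- ===== VERDICT (by name: the statement is the Claim_ definition above) =====
theorem transform_duplicate_block_from_seeds_spec : Claim_equal_transform_duplicate_block_from_seeds := by
  intro g _
  unfold Spec_transform_duplicate_block_from_seeds
  unfold transform_duplicate_block_from_seeds transform_duplicate_block_from_seeds_alt
  rw [pvFindBlockB_eq g (g.length - 0) 0 rfl]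
  cases hfind : pvFindBlockA g 0 with
  | none => rfl
  | some p =>
    obtain ⟨bs, B⟩ := p
    obtain ⟨hbs, hB⟩ := pvFindBlockA_lt g (g.length - 0) 0 bs B rfl hfind
    dsimp only
    rw [show (bs : Int) + B - 1 + 2 = (bs : Int) + B + 1 from by ring]
    by_cases hL : 0 ≤ (bs : Int) - 2 ∧ g.getD ((bs : Int) - 2).toNat 0 ≠ 0 <;>
      by_cases hR : (bs : Int) + B + 1 < (g.length : Int) ∧ g.getD ((bs : Int) + B + 1).toNat 0 ≠ 0
    · -- both seeds
      rw [if_pos (show 0 ≤ (bs : Int) - 2 ∧ (bs : Int) - 2 < (g.length : Int) ∧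
            g.getD ((bs : Int) - 2).toNat 0 ≠ 0 from ⟨hL.1, by omega, hL.2⟩),
        if_pos (show 0 ≤ (bs : Int) + B + 1 ∧ (bs : Int) + B + 1 < (g.length : Int) ∧
            g.getD ((bs : Int) + B + 1).toNat 0 ≠ 0 from ⟨by omega, hR.1, hR.2⟩),
        if_pos hL, if_pos hR]
      simp only [List.cons_append, List.nil_append, List.foldl_cons, List.foldl_nil, reduceIte]
      rw [if_neg (show ¬("right" : String) = "left" from by decide)]
      apply List.ext_getElem?
      intro x
      rw [pvPaintRight_get? (g.getD ((bs : Int) + B + 1).toNat 0) B ((g.length : Int))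
          (((g.length : Int)) - ((bs : Int) + B + 1)).toNat ((bs : Int) + B + 1) rfl (by omega)
          _ (by rw [pvPaintLeft_length _ B (((bs : Int) - 2) + 1).toNat ((bs : Int) - 2) rfl g]) x,
        pvPaintLeft_get? (g.getD ((bs : Int) - 2).toNat 0) B (((bs : Int) - 2) + 1).toNat
          ((bs : Int) - 2) rfl g x]
      by_cases hx : x < g.length
      · rw [List.getElem?_map, List.getElem?_range hx, List.getElem?_eq_getElem hx]
        simp only [pvCellB, Option.map_some, List.getD_eq_getElem?_getD,
          List.getElem?_eq_getElem hx, Option.getD_some]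
        split_ifs <;> rfl
      · rw [List.getElem?_map,
          List.getElem?_eq_none (show (List.range g.length).length ≤ x by
            rw [List.length_range]; omega),
          List.getElem?_eq_none (show g.length ≤ x by omega)]
        split_ifs <;> rfl
    · -- left seed only
      rw [if_pos (show 0 ≤ (bs : Int) - 2 ∧ (bs : Int) - 2 < (g.length : Int) ∧
            g.getD ((bs : Int) - 2).toNat 0 ≠ 0 from ⟨hL.1, by omega, hL.2⟩),
        if_neg (show ¬(0 ≤ (bs : Int) + B + 1 ∧ (bs : Int) + B + 1 < (g.length : Int) ∧
            g.getD ((bs : Int) + B + 1).toNat 0 ≠ 0) from fun hc => hR ⟨hc.2.1, hc.2.2⟩),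
        if_pos hL, if_neg hR]
      simp only [List.append_nil, List.foldl_cons, List.foldl_nil, reduceIte]
      apply List.ext_getElem?
      intro x
      rw [pvPaintLeft_get? (g.getD ((bs : Int) - 2).toNat 0) B (((bs : Int) - 2) + 1).toNat
          ((bs : Int) - 2) rfl g x]
      by_cases hx : x < g.length
      · rw [List.getElem?_map, List.getElem?_range hx, List.getElem?_eq_getElem hx]
        simp only [pvCellB, Option.map_some, List.getD_eq_getElem?_getD,
          List.getElem?_eq_getElem hx, Option.getD_some]
        split_ifs <;> rfl
      · rw [List.getElem?_map,
          List.getElem?_eq_none (show (List.range g.length).length ≤ x by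
            rw [List.length_range]; omega),
          List.getElem?_eq_none (show g.length ≤ x by omega)]
        split_ifs <;> rfl
    · -- right seed only
      rw [if_neg (show ¬(0 ≤ (bs : Int) - 2 ∧ (bs : Int) - 2 < (g.length : Int) ∧
            g.getD ((bs : Int) - 2).toNat 0 ≠ 0) from fun hc => hL ⟨hc.1, hc.2.2⟩),
        if_pos (show 0 ≤ (bs : Int) + B + 1 ∧ (bs : Int) + B + 1 < (g.length : Int) ∧
            g.getD ((bs : Int) + B + 1).toNat 0 ≠ 0 from ⟨by omega, hR.1, hR.2⟩),
        if_neg hL, if_pos hR]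
      simp only [List.nil_append, List.foldl_cons, List.foldl_nil]
      rw [if_neg (show ¬("right" : String) = "left" from by decide)]
      apply List.ext_getElem?
      intro x
      rw [pvPaintRight_get? (g.getD ((bs : Int) + B + 1).toNat 0) B ((g.length : Int))
          (((g.length : Int)) - ((bs : Int) + B + 1)).toNat ((bs : Int) + B + 1) rfl (by omega)
          g rfl x]
      by_cases hx : x < g.length
      · rw [List.getElem?_map, List.getElem?_range hx, List.getElem?_eq_getElem hx]
        simp only [pvCellB, Option.map_some, List.getD_eq_getElem?_getD,
          List.getElem?_eq_getElem hx, Option.getD_some]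
        split_ifs <;> rfl
      · rw [List.getElem?_map,
          List.getElem?_eq_none (show (List.range g.length).length ≤ x by
            rw [List.length_range]; omega),
          List.getElem?_eq_none (show g.length ≤ x by omega)]
        split_ifs <;> rfl
    · -- no seeds
      rw [if_neg (show ¬(0 ≤ (bs : Int) - 2 ∧ (bs : Int) - 2 < (g.length : Int) ∧
            g.getD ((bs : Int) - 2).toNat 0 ≠ 0) from fun hc => hL ⟨hc.1, hc.2.2⟩),
        if_neg (show ¬(0 ≤ (bs : Int) + B + 1 ∧ (bs : Int) + B + 1 < (g.length : Int) ∧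
            g.getD ((bs : Int) + B + 1).toNat 0 ≠ 0) from fun hc => hR ⟨hc.2.1, hc.2.2⟩),
        if_neg hL, if_neg hR]
      simp only [List.append_nil, List.foldl_nil]
      apply List.ext_getElem?
      intro x
      by_cases hx : x < g.length
      · rw [List.getElem?_map, List.getElem?_range hx, List.getElem?_eq_getElem hx]
        simp only [pvCellB, Option.map_some, List.getD_eq_getElem?_getD,
          List.getElem?_eq_getElem hx, Option.getD_some]
      · rw [List.getElem?_map,
          List.getElem?_eq_none (show (List.range g.length).length ≤ x by
            rw [List.length_range]; omega),
          List.getElem?_eq_none (show g.length ≤ x by omega)]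
        rfl
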